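-- pv_equiv track=rewrite | github.com/FoundationAgents/OpenManus | app/security/acl.py | _parse_default_permission
-- ===== SOURCE A (Python) =====
-- from typing import Dict, Iterable, List, Optional, Set, Tuple
--
-- ALLOWED_OPERATIONS: Set[str] = {"read", "write", "execute", "delete"}
--
-- def _parse_default_permission(value: str) -> Set[str]:
--     if not value:
--         return set()
--     parts = [part.strip().lower() for part in value.split(",") if part.strip()]
--     normalized: Set[str] = set()
--     for part in parts:
--         if part == "all":
--             normalized.add("all")
--         elif part in ALLOWED_OPERATIONS:
--             normalized.add(part)
--     return normalized
-- ===== SOURCE B (Python) =====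
-- ALLOWED = ("read", "write", "execute", "delete", "all")
--
-- def _parse_default_permission(value):
--     # single character-level scan: no split(), tokens are finalized at each comma
--     result = set()
--     buf = []
--     for ch in value + ",":
--         if ch == ",":
--             token = "".join(buf).strip().lower()
--             if token in ALLOWED:
--                 result.add(token)
--             buf = []
--         else:
--             buf.append(ch)
--     return result
-- ===== Notes on version B (the rewrite author's own statement) =====
-- stated objective: alternative
-- what changed: Replaces the split/comprehension/branching-loop pipeline by a single character-level scan with a token buffer that finalizes (strip+lower+vocabulary check) at each comma, so the string is traversed once with no intermediate parts list.
import Mathlib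
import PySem

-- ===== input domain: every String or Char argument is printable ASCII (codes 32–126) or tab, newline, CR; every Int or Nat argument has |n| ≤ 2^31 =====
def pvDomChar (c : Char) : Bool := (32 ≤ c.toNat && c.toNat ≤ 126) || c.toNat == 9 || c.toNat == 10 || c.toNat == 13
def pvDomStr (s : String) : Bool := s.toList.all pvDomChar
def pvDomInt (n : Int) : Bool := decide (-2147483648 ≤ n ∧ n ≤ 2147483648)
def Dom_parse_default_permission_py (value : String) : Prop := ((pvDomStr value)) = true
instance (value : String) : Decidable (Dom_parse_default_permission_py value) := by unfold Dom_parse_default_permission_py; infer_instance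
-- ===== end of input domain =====

-- B replaces A's split/comprehension/branching-loop pipeline with a single
-- character-level scan: a token buffer is finalized at each comma (objective: alternative).

-- ===== PORT A =====
-- ALLOWED_OPERATIONS (a module-level set literal, insertion order)
def allowedOperations : PySem.Set String := PySem.Set.ofList ["read", "write", "execute", "delete"]

def parse_default_permission_py (value : String) : List String :=
  if value = "" then PySem.Set.empty
  else
    let parts := ((PySem.Chars.splitOn value.toList ",".toList).filter
        (fun part => PySem.Chars.strip part ≠ [])).map
        (fun part => String.ofList (PySem.Chars.lower (PySem.Chars.strip part)))
    parts.foldl (fun normalized part =>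
      if part = "all" then PySem.Set.add normalized "all"
      else if allowedOperations.contains part then PySem.Set.add normalized part
      else normalized) PySem.Set.empty

-- ===== PORT B =====
-- ALLOWED tuple of Source B
def allowedAlt : List String := ["read", "write", "execute", "delete", "all"]

-- token = "".join(buf).strip().lower()
def pdpNorm (buf : List Char) : String :=
  String.ofList (PySem.Chars.lower (PySem.Chars.strip buf))

-- body of Source B's for-loop over the characters of value + ","
def pdpStep (st : PySem.Set String × List Char) (ch : Char) : PySem.Set String × List Char :=
  if ch = ',' then
    let token := pdpNorm st.2
    (if allowedAlt.contains token then PySem.Set.add st.1 token else st.1, [])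
  else (st.1, st.2 ++ [ch])

def parse_default_permission_py_alt (value : String) : List String :=
  ((value.toList ++ [',']).foldl pdpStep (PySem.Set.empty, [])).1

-- ===== PRECONDITION & SPEC =====
def Spec_parse_default_permission_py (value : String) (out : List String) : Prop := out = parse_default_permission_py_alt value
instance (value : String) (out : List String) : Decidable (Spec_parse_default_permission_py value out) := by unfold Spec_parse_default_permission_py; infer_instance

-- ===== CLAIM (what is proved, stated in full; the proofs are below) =====
def Claim_equal_parse_default_permission_py : Prop := ∀ (value : String), Dom_parse_default_permission_py value → Spec_parse_default_permission_py value (parse_default_permission_py value)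

-- ===== LEMMAS AND PROOFS =====

-- a reference single-character split (tokens of s split at ',', pre = pending prefix)
def splitChar (pre : List Char) : List Char → List (List Char)
  | [] => [pre]
  | c :: rest => if c = ',' then pre :: splitChar [] rest else splitChar (pre ++ [c]) rest

-- per-token action shared by both sides: normalize and conditionally insert
def pdpTok (res : PySem.Set String) (tok : List Char) : PySem.Set String :=
  if allowedAlt.contains (pdpNorm tok) then PySem.Set.add res (pdpNorm tok) else res

theorem splitOn_go_eq (l : List Char) : ∀ (fuel : Nat) (cur : List Char) (acc : List (List Char)),
    l.length ≤ fuel →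
    PySem.Chars.splitOn.go [','] fuel l cur acc = acc.reverse ++ splitChar cur.reverse l := by
  induction l with
  | nil =>
      intro fuel cur acc _
      cases fuel <;> simp [PySem.Chars.splitOn.go, splitChar]
  | cons c rest ih =>
      intro fuel cur acc h
      cases fuel with
      | zero => simp at h
      | succ f =>
        simp only [PySem.Chars.splitOn.go]
        by_cases hc : c = ','
        · subst hc
          have hp : [','].isPrefixOf (',' :: rest) = true := by simp [List.isPrefixOf]
          simp only [hp, if_true, List.drop, List.length] at *
          rw [ih f [] (cur.reverse :: acc) (by simpa using Nat.le_of_succ_le_succ h)]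
          simp [splitChar]
        · have hp : [','].isPrefixOf (c :: rest) = false := by
            simp only [List.isPrefixOf, Bool.and_eq_true, beq_iff_eq,
              and_true, Bool.eq_false_iff, ne_eq]
            exact fun h' => hc h'.symm
          simp only [hp, Bool.false_eq_true, if_false]
          rw [ih f _ acc (by simpa using Nat.le_of_succ_le_succ h)]
          simp [splitChar, hc]

theorem splitOn_eq_splitChar (s : List Char) :
    PySem.Chars.splitOn s [','] = splitChar [] s := by
  show PySem.Chars.splitOn.go [','] (s.length + 1) s [] [] = splitChar [] s
  rw [splitOn_go_eq s (s.length + 1) [] [] (Nat.le_succ _)]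
  rfl

-- Source B's scan equals the per-token fold over the comma-split
theorem scan_eq (s : List Char) : ∀ (res : PySem.Set String) (buf : List Char),
    ((s ++ [',']).foldl pdpStep (res, buf)).1 = (splitChar buf s).foldl pdpTok res := by
  induction s with
  | nil =>
      intro res buf
      simp [pdpStep, pdpTok, splitChar]
  | cons c rest ih =>
      intro res buf
      by_cases hc : c = ','
      · subst hc
        simp only [List.cons_append, List.foldl_cons, splitChar, if_true]
        rw [show pdpStep (res, buf) ',' = (pdpTok res buf, []) from by simp [pdpStep, pdpTok]]
        exact ih _ _
      · simp only [List.cons_append, List.foldl_cons, splitChar, hc, if_false]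
        rw [show pdpStep (res, buf) c = (res, buf ++ [c]) from by simp [pdpStep, hc]]
        exact ih _ _

-- fold over a filtered-and-mapped list as a guarded fold over the original list
theorem foldl_filter_map {α β γ : Type} (p : α → Bool) (f : α → β) (h : γ → β → γ)
    (l : List α) (init : γ) :
    ((l.filter p).map f).foldl h init
      = l.foldl (fun s t => if p t then h s (f t) else s) init := by
  induction l generalizing init with
  | nil => rfl
  | cons x xs ih => by_cases hx : p x = true <;> simp [hx, ih]

theorem foldl_ext {α β : Type} (f g : β → α → β) (hfg : ∀ b a, f b a = g b a)
    (l : List α) (init : β) : l.foldl f init = l.foldl g init := by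
  induction l generalizing init with
  | nil => rfl
  | cons x xs ih => simp only [List.foldl_cons, hfg, ih]

theorem norm_empty_not_allowed (t : List Char) (h : PySem.Chars.strip t = []) :
    allowedAlt.contains (pdpNorm t) = false := by
  simp [pdpNorm, h, PySem.Chars.lower, allowedAlt]

-- ===== VERDICT (by name: the statement is the Claim_ definition above) =====
theorem parse_default_permission_py_spec : Claim_equal_parse_default_permission_py := by
  unfold Claim_equal_parse_default_permission_py Spec_parse_default_permission_py
  intro value _
  unfold parse_default_permission_py parse_default_permission_py_alt
  rw [scan_eq value.toList PySem.Set.empty []]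
  by_cases hv : value = ""
  · subst hv; decide
  · simp only [hv, if_false]
    rw [show (",".toList : List Char) = [','] from rfl, ← splitOn_eq_splitChar,
      foldl_filter_map]
    refine foldl_ext _ _ ?_ _ _
    intro s t
    by_cases hs : PySem.Chars.strip t = []
    · simp only [ne_eq, hs, not_true_eq_false, decide_false, Bool.false_eq_true, if_false,
        pdpTok, norm_empty_not_allowed t hs]
    · simp only [ne_eq, hs, not_false_eq_true, decide_true, if_true]
      unfold pdpTok pdpNorm
      by_cases ha : String.ofList (PySem.Chars.lower (PySem.Chars.strip t)) = "all"
      · rw [ha]; simp [allowedAlt, List.contains_eq_mem]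
      · have hcont : allowedAlt.contains (String.ofList (PySem.Chars.lower (PySem.Chars.strip t)))
            = allowedOperations.contains (String.ofList (PySem.Chars.lower (PySem.Chars.strip t))) := by
          rw [show allowedOperations.contains = (List.contains ["read", "write", "execute", "delete"] : String → Bool) from by
            funext x; rw [PySem.Set.contains_eq_listContains]; rfl]
          simp [allowedAlt, List.contains_eq_mem, ha]
        rw [hcont]
        simp [ha]
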